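-- pv_equiv track=rewrite | github.com/ArdanaCLM/cephlm | cephlm/cephmetrics/ceph/cluster.py | _process_status_message
-- ===== SOURCE A (Python) =====
-- def _process_status_message(status, summary):
--     filtered_summary = [entry['summary'] for entry in summary
--                         if entry['severity'] == status]
--     # We could simply report the above list as message, but may end up
--     # bloating the UI screen with a big message truncated by at will by
--     # Monasca. Hence we truncate it ourselves and convey how many such
--     # messages have been truncated
--     message_list = list()
--     message = str()
--     msg_ctr = 0
--     for element in filtered_summary:
--         # 2048 chars is the message limit for Monasca of which the body
--         # constitutes utmost 1916 chars. 1916 minus 56 chars for the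
--         # message prefix and truncated message suffix, we have 1860 left
--         if len(message) > 1860:
--             break
--         message_list.append(element)
--         message = ", ".join(message_list)
--         msg_ctr += 1
--     if msg_ctr < len(filtered_summary):
--         message = "%s (truncated %s messages)" \
--                   % (message, len(filtered_summary) - msg_ctr)
--     return message
-- ===== SOURCE B (Python) =====
-- def _process_status_message(status, summary):
--     filtered = [entry['summary'] for entry in summary
--                 if entry['severity'] == status]
--     # cutoff = number of leading elements A would have joined: the running
--     # join-length (len(first) then +2+len(e) per element) is checked against 1860
--     if filtered:
--         cutoff = len(filtered)
--         acc = len(filtered[0])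
--         for i in range(1, len(filtered)):
--             if acc > 1860:
--                 cutoff = i
--                 break
--             acc += 2 + len(filtered[i])
--     else:
--         cutoff = 0
--     message = ", ".join(filtered[:cutoff])
--     if cutoff < len(filtered):
--         message = "%s (truncated %s messages)" % (message, len(filtered) - cutoff)
--     return message
-- ===== Notes on version B (the rewrite author's own statement) =====
-- stated objective: faster
-- what changed: Replaces A's per-element full rejoin of the growing message list by a single running-join-length pass that finds the cutoff index followed by one final join.
-- outside the precondition, e.g. on _process_status_message('a', [{'summary': 'x'}]): A raises KeyError, B raises KeyError
import Mathlib
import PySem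

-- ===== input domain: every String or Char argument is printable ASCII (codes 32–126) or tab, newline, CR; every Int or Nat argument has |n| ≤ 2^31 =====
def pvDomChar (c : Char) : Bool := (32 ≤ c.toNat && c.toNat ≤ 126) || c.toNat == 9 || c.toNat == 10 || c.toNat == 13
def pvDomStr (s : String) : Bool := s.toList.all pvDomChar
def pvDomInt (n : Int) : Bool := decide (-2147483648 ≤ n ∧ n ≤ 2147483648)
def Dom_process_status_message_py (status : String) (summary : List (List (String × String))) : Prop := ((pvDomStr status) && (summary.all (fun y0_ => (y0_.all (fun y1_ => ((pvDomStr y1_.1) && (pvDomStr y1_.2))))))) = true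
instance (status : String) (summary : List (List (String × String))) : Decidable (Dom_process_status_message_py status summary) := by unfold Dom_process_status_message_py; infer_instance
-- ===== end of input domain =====

-- B replaces A's rejoin-per-element loop by one running-join-length pass that finds the
-- cutoff index, followed by a single join (objective: faster by avoiding repeated joins).

-- ===== PORT A =====
-- entry['severity'] / entry['summary']: first-match dict lookup; Pre_ guarantees the key is present
def pvLookup (entry : List (String × String)) (k : String) : String :=
  ((PySem.Dict.mk entry).get? k).getD ""

-- the comprehension [entry['summary'] for entry in summary if entry['severity'] == status]
def pvFiltered (status : String) (summary : List (List (String × String))) : List String :=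
  summary.filterMap (fun entry =>
    if pvLookup entry "severity" == status then some (pvLookup entry "summary") else none)

-- A's for-loop with break: state = (message_list, message, msg_ctr)
def pvLoopA : List String → List String → String → Nat → String × Nat
  | [], _, message, ctr => (message, ctr)
  | e :: rest, ml, message, ctr =>
    if PySem.Str.len message > 1860 then (message, ctr)
    else
      let ml' := ml ++ [e]
      pvLoopA rest ml' (PySem.Str.join ", " ml') (ctr + 1)

def process_status_message_py (status : String) (summary : List (List (String × String))) : String :=
  let fs := pvFiltered status summary
  let r := pvLoopA fs [] "" 0
  if r.2 < fs.length then
    r.1 ++ " (truncated " ++ PySem.Int.toStr ((fs.length : Int) - (r.2 : Int)) ++ " messages)"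
  else r.1

-- ===== PORT B =====
-- B's index loop over filtered[1:]: returns how many further elements fit
-- (0 as soon as the running join-length acc exceeds 1860)
def pvCutB : Int → List String → Nat
  | _, [] => 0
  | acc, e :: r => if acc > 1860 then 0 else 1 + pvCutB (acc + 2 + PySem.Str.len e) r

def process_status_message_py_alt (status : String) (summary : List (List (String × String))) : String :=
  let fs := pvFiltered status summary
  let cutoff : Nat :=
    match fs with
    | [] => 0
    | f0 :: rest => 1 + pvCutB (PySem.Str.len f0) rest
  let message := PySem.Str.join ", " (fs.take cutoff)
  if cutoff < fs.length then
    message ++ " (truncated " ++ PySem.Int.toStr ((fs.length : Int) - (cutoff : Int)) ++ " messages)"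
  else message

-- ===== PRECONDITION & SPEC =====
-- Pre_ excludes exactly the inputs where Python A raises KeyError: an entry without a
-- 'severity' key, or a matching entry without a 'summary' key.
def Pre_process_status_message_py (status : String) (summary : List (List (String × String))) : Prop :=
  ∀ e ∈ summary, ((PySem.Dict.mk e).get? "severity").isSome = true ∧
    ((PySem.Dict.mk e).get? "severity" = some status → ((PySem.Dict.mk e).get? "summary").isSome = true)
instance (status : String) (summary : List (List (String × String))) : Decidable (Pre_process_status_message_py status summary) := by unfold Pre_process_status_message_py; infer_instance

def pvWitness_process_status_message_py : String × (List (List (String × String))) :=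
  ("WARN", [[("severity", "WARN"), ("summary", "osd down")], [("severity", "OK"), ("summary", "fine")]])

def Spec_process_status_message_py (status : String) (summary : List (List (String × String))) (out : String) : Prop := out = process_status_message_py_alt status summary
instance (status : String) (summary : List (List (String × String))) (out : String) : Decidable (Spec_process_status_message_py status summary out) := by unfold Spec_process_status_message_py; infer_instance

-- ===== CLAIM (what is proved, stated in full; the proofs are below) =====
def Claim_equal_process_status_message_py : Prop := ∀ (status : String) (summary : List (List (String × String))), Dom_process_status_message_py status summary → Pre_process_status_message_py status summary → Spec_process_status_message_py status summary (process_status_message_py status summary)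

-- ===== LEMMAS AND PROOFS =====

-- the number of elements A's loop appends, phrased over A's state
def pvG : List String → List String → Nat
  | _, [] => 0
  | ml, e :: r =>
    if PySem.Str.len (PySem.Str.join ", " ml) > 1860 then 0 else 1 + pvG (ml ++ [e]) r

theorem pv_len_join_append (ml : List String) (e : String) (h : ml ≠ []) :
    PySem.Str.len (PySem.Str.join ", " (ml ++ [e]))
      = PySem.Str.len (PySem.Str.join ", " ml) + 2 + PySem.Str.len e := by
  obtain ⟨a, l, rfl⟩ := List.exists_cons_of_ne_nil h
  simp only [PySem.Str.len_eq, PySem.Str.toList_join]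
  induction l generalizing a with
  | nil =>
    simp only [List.cons_append, List.nil_append, List.map_cons, List.map_nil,
      PySem.Chars.join_cons_cons, PySem.Chars.join_singleton, List.length_append]
    have h2 : (", ".toList).length = 2 := by decide
    omega
  | cons b l ih =>
    simp only [List.cons_append, List.map_cons, PySem.Chars.join_cons_cons] at *
    have hb := ih b (by simp)
    simp only [List.length_append] at *
    omega

theorem pv_loopA_eq (rest : List String) : ∀ (ml : List String) (n : Nat),
    pvLoopA rest ml (PySem.Str.join ", " ml) n
      = (PySem.Str.join ", " (ml ++ rest.take (pvG ml rest)), n + pvG ml rest) := by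
  induction rest with
  | nil => intro ml n; simp [pvLoopA, pvG]
  | cons e r ih =>
    intro ml n
    simp only [pvLoopA, pvG]
    split
    · simp
    · rw [ih (ml ++ [e]) (n + 1)]
      simp only [Prod.mk.injEq]
      refine ⟨?_, by omega⟩
      rw [Nat.add_comm 1 (pvG (ml ++ [e]) r), List.take_succ_cons,
        List.append_assoc, List.singleton_append]

theorem pv_G_eq_cutB (r : List String) : ∀ (ml : List String), ml ≠ [] →
    pvG ml r = pvCutB (PySem.Str.len (PySem.Str.join ", " ml)) r := by
  induction r with
  | nil => intro ml _; simp [pvG, pvCutB]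
  | cons e rr ih =>
    intro ml h
    simp only [pvG, pvCutB]
    split
    · rfl
    · rw [ih (ml ++ [e]) (by simp), pv_len_join_append ml e h]

-- ===== VERDICT (by name: the statement is the Claim_ definition above) =====
theorem process_status_message_py_spec : Claim_equal_process_status_message_py := by
  intro status summary _ _
  unfold Spec_process_status_message_py
  unfold process_status_message_py process_status_message_py_alt
  have hjoin0 : PySem.Str.join ", " ([] : List String) = "" := by decide
  have h := pv_loopA_eq (pvFiltered status summary) [] 0
  rw [hjoin0] at h
  simp only [h, List.nil_append, Nat.zero_add]
  cases hfs : pvFiltered status summary with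
  | nil => simp [pvG]
  | cons f0 rest =>
    have hG : pvG [] (f0 :: rest) = 1 + pvCutB (PySem.Str.len f0) rest := by
      simp only [pvG, List.nil_append]
      rw [if_neg (by rw [hjoin0]; decide)]
      rw [pv_G_eq_cutB rest [f0] (by simp)]
      congr 1
      rw [PySem.Str.len_eq, PySem.Str.toList_join]
      simp [PySem.Chars.join_singleton, PySem.Str.len_eq]
    rw [hG]
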